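-- pv_equiv track=rewrite | github.com/cHris0119/Liber-Locus | LB_API/serializer.py | es_rut_valido
-- ===== SOURCE A (Python) =====
-- def es_rut_valido(rut):
--     # Eliminar posibles puntos y guiones del RUT y espacios en blanco adicionales.
--     rut = rut.replace('.', '').replace('-', '').strip()
--
--     # Verificar que el RUT consta de al menos 8 caracteres (números o "K").
--     if not rut.isdigit() or len(rut) < 8:
--         return False
--
--     # Separar los números del RUT (sin el dígito verificador) y el dígito verificador.
--     rut_numeros = rut[:-1]
--     digito_verificador = rut[-1]
--
--     # Calcular el dígito verificador esperado (DV).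
--     suma = 0
--     multiplo = 2
--     for d in reversed(rut_numeros):
--         valor = int(d) * multiplo
--         if valor >= 10:
--             valor -= 9
--         suma += valor
--         multiplo = 2 if multiplo == 1 else 1
--
--     resto = suma % 11
--     dv_esperado = 11 - resto if resto != 0 else 0
--
--     # Comparar el dígito verificador calculado con el proporcionado en el RUT.
--     if digito_verificador.isdigit():
--         return int(digito_verificador) == dv_esperado
--     elif digito_verificador.upper() == 'K':
--         return dv_esperado == 10
--
--     return False
-- ===== SOURCE B (Python) =====
-- def es_rut_valido(rut):
--     # Clean dots, dashes and surrounding whitespace.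
--     rut = rut.replace('.', '').replace('-', '').strip()
--
--     if not rut.isdigit() or len(rut) < 8:
--         return False
--
--     # Reversed body split into two strided slices: even positions carry the
--     # doubled-with-correction weight, odd positions count as-is.
--     rev = rut[:-1][::-1]
--     dobles = rev[::2]
--     simples = rev[1::2]
--     suma = sum(2 * int(c) - (9 if int(c) >= 5 else 0) for c in dobles) \
--          + sum(map(int, simples))
--
--     # dv_esperado = 11 - suma % 11 (mapped to 0 when suma % 11 == 0) = -suma % 11.
--     return int(rut[-1]) == -suma % 11
-- ===== Notes on version B (the rewrite author's own statement) =====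
-- stated objective: alternative
-- what changed: The toggling-multiplier loop over the reversed body is replaced by two strided passes (even positions doubled with the >=10 correction folded in as a >=5 test, odd positions summed as-is), and the expected check digit is compared directly as -suma % 11 instead of the resto/11-resto branch and the unreachable non-digit comparison chain.
import Mathlib
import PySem

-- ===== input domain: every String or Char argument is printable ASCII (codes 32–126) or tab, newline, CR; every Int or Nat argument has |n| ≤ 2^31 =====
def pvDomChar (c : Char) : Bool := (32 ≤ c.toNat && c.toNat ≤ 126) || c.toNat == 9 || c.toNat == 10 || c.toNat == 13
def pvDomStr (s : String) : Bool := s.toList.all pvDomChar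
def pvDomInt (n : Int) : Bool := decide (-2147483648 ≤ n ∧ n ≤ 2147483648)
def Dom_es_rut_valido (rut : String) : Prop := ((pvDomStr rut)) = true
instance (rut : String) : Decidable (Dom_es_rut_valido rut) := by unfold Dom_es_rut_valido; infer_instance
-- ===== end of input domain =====

-- B replaces A's toggling-multiplier loop by two strided passes (doubled even
-- positions / plain odd positions of the reversed body) and folds the expected
-- check digit into a single `-suma % 11`; objective: alternative decomposition.

-- int(c) for a single digit character (exact: only used under an isdigit guard)
def pvVal (c : Char) : Int := (c.toNat : Int) - 48

-- ===== PORT A =====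
def es_rut_valido (rut : String) : Bool :=
  -- rut = rut.replace('.', '').replace('-', '').strip()
  let cs := PySem.Chars.strip (PySem.Chars.replace (PySem.Chars.replace rut.toList ['.'] []) ['-'] [])
  if ¬ PySem.Chars.strIsdigit cs = true ∨ cs.length < 8 then false
  else
    let rutNumeros := PySem.List.slice cs none (some (-1))      -- rut[:-1]
    match PySem.List.pyGet? cs (-1) with                        -- rut[-1]
    | none => false  -- unreachable: the guard ensured len(rut) ≥ 8 > 0
    | some digitoVerificador =>
      let st := rutNumeros.reverse.foldl
        (fun (st : Int × Int) d =>
          let valor := pvVal d * st.2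
          let valor := if valor ≥ 10 then valor - 9 else valor
          (st.1 + valor, if st.2 == 1 then 2 else 1)) (0, 2)
      let resto := PySem.Int.mod st.1 11
      let dvEsperado := if resto ≠ 0 then 11 - resto else 0
      if PySem.Chars.isdigit digitoVerificador then
        pvVal digitoVerificador == dvEsperado
      else if PySem.Chars.upperChar digitoVerificador == 'K' then
        dvEsperado == 10
      else false

-- ===== PORT B =====
-- rev[::2] / rev[1::2]: the step-2 slice from index 0, ported by hand (exact)
def pvEvery2 {α : Type} : List α → List α
  | [] => []
  | [a] => [a]
  | a :: _ :: t => a :: pvEvery2 t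

def es_rut_valido_alt (rut : String) : Bool :=
  -- rut = rut.replace('.', '').replace('-', '').strip()
  let cs := PySem.Chars.strip (PySem.Chars.replace (PySem.Chars.replace rut.toList ['.'] []) ['-'] [])
  if ¬ PySem.Chars.strIsdigit cs = true ∨ cs.length < 8 then false
  else
    let rev := (PySem.List.slice cs none (some (-1))).reverse   -- rut[:-1][::-1]
    let dobles := pvEvery2 rev                                  -- rev[::2]
    let simples := pvEvery2 rev.tail                            -- rev[1::2]
    let suma := (dobles.map (fun c => 2 * pvVal c - (if pvVal c ≥ 5 then 9 else 0))).sum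
              + (simples.map pvVal).sum
    match PySem.List.pyGet? cs (-1) with                        -- rut[-1]
    | none => false  -- unreachable: the guard ensured len(rut) ≥ 8 > 0
    | some dv => pvVal dv == PySem.Int.mod (-suma) 11

-- ===== PRECONDITION & SPEC =====
def Spec_es_rut_valido (rut : String) (out : Bool) : Prop := out = es_rut_valido_alt rut
instance (rut : String) (out : Bool) : Decidable (Spec_es_rut_valido rut out) := by unfold Spec_es_rut_valido; infer_instance

-- ===== CLAIM (what is proved, stated in full; the proofs are below) =====
def Claim_equal_es_rut_valido : Prop := ∀ (rut : String), Dom_es_rut_valido rut → Spec_es_rut_valido rut (es_rut_valido rut)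

-- ===== LEMMAS AND PROOFS =====

theorem pvEvery2_cons {α : Type} (x : α) (xs : List α) :
    pvEvery2 (x :: xs) = x :: pvEvery2 xs.tail := by
  cases xs <;> simp [pvEvery2]

theorem pvGet_neg_one {α : Type} (xs : List α) :
    PySem.List.pyGet? xs (-1) = xs.getLast? := by
  cases xs with
  | nil => simp [PySem.List.pyGet?, PySem.List.pyIdx?]
  | cons a t =>
    simp only [PySem.List.pyGet?, PySem.List.pyIdx?, List.length_cons]
    rw [if_neg (by omega), if_pos (by push_cast; omega)]
    simp [List.getLast?_eq_getElem?]

theorem pvDigit_val (c : Char) (h : PySem.Chars.isdigit c = true) :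
    0 ≤ pvVal c ∧ pvVal c < 10 := by
  simp only [PySem.Chars.isdigit, Bool.and_eq_true, decide_eq_true_eq, Char.le_def,
    UInt32.le_iff_toNat_le] at h
  obtain ⟨h1, h2⟩ := h
  have e0 : '0'.val.toNat = 48 := rfl
  have e9 : '9'.val.toNat = 57 := rfl
  simp only [pvVal, Char.toNat]
  omega

theorem pvCorr (v : Int) :
    (if v * 2 ≥ 10 then v * 2 - 9 else v * 2) = 2 * v - (if v ≥ 5 then 9 else 0) := by
  split_ifs <;> omega

theorem pvLoop : ∀ (l : List Char) (s : Int), (∀ c ∈ l, pvVal c < 10) →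
    (l.foldl
        (fun (st : Int × Int) d =>
          let valor := pvVal d * st.2
          let valor := if valor ≥ 10 then valor - 9 else valor
          (st.1 + valor, if st.2 == 1 then 2 else 1)) (s, 2)).1
      = s + ((pvEvery2 l).map (fun c => 2 * pvVal c - (if pvVal c ≥ 5 then 9 else 0))).sum
          + ((pvEvery2 l.tail).map pvVal).sum
  | [], s, _ => by simp [pvEvery2]
  | [a], s, _ => by
    simp only [List.foldl_cons, List.foldl_nil, pvEvery2, List.tail, List.map_cons,
      List.map_nil, List.sum_cons, List.sum_nil]
    rw [pvCorr]
    norm_num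
  | a :: b :: t, s, h => by
    have hb : pvVal b < 10 := h b (by simp)
    have ht : ∀ c ∈ t, pvVal c < 10 := fun c hc => h c (by simp [hc])
    simp only [List.foldl_cons]
    rw [show ((if ((2:Int) == 1) = true then (2:Int) else 1) = 1) from by norm_num,
        show ((if ((1:Int) == 1) = true then (2:Int) else 1) = 2) from by norm_num]
    rw [if_neg (by omega : ¬ pvVal b * 1 ≥ 10)]
    rw [pvLoop t _ ht]
    rw [pvEvery2_cons a]
    simp only [List.tail_cons]
    rw [pvEvery2_cons b]
    simp only [List.map_cons, List.sum_cons]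
    rw [pvCorr]
    ring

theorem pvDv_eq (suma : Int) :
    (if PySem.Int.mod suma 11 ≠ 0 then 11 - PySem.Int.mod suma 11 else 0)
      = PySem.Int.mod (-suma) 11 := by
  rw [PySem.Int.mod_eq_emod_of_pos (by norm_num : (0:Int) < 11),
      PySem.Int.mod_eq_emod_of_pos (by norm_num : (0:Int) < 11)]
  omega

-- ===== VERDICT (by name: the statement is the Claim_ definition above) =====
theorem es_rut_valido_spec : Claim_equal_es_rut_valido := by
  intro rut _
  unfold Spec_es_rut_valido es_rut_valido es_rut_valido_alt
  set cs := PySem.Chars.strip (PySem.Chars.replace (PySem.Chars.replace rut.toList ['.'] []) ['-'] []) with hcs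
  by_cases hg : ¬ PySem.Chars.strIsdigit cs = true ∨ cs.length < 8
  · rw [if_pos hg, if_pos hg]
  · rw [if_neg hg, if_neg hg]
    push Not at hg
    obtain ⟨hdig, hlen⟩ := hg
    have hne : cs ≠ [] := by intro h; rw [h] at hlen; simp at hlen
    have hall : ∀ c ∈ cs, PySem.Chars.isdigit c = true := by
      intro c hc
      simp only [PySem.Chars.strIsdigit, Bool.and_eq_true, List.all_eq_true] at hdig
      exact hdig.2 c hc
    rw [pvGet_neg_one, List.getLast?_eq_some_getLast hne]
    dsimp only
    have hdv : PySem.Chars.isdigit (cs.getLast hne) = true :=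
      hall _ (List.getLast_mem hne)
    rw [if_pos hdv]
    have hrev : ∀ c ∈ (PySem.List.slice cs none (some (-1))).reverse, pvVal c < 10 := by
      intro c hc
      rw [List.mem_reverse, PySem.List.slice_to_neg_one] at hc
      exact (pvDigit_val c (hall c (List.dropLast_subset cs hc))).2
    rw [pvLoop _ 0 hrev, zero_add, pvDv_eq]
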